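-- pv_equiv track=rewrite | github.com/UNDEO157K/Turtle-Game | cp_4.py | get_siders
-- ===== SOURCE A (Python) =====
-- grid = [
--     ["A1","A2","A3","A4"],
--     ["B1","B2","B3","B4"],
--     ["C1","C2","C3","C4"],
--     ["D1","D2","D3","D4"]
-- ]
--
-- def get_siders(box):
--     for i in range(0,4):
--         for j in range(0,4):
--             if grid[i][j] == box:
--                 siders = []
--                 if i > 0: siders.append(grid[i-1][j])
--                 if i < 3: siders.append(grid[i+1][j])
--                 if j > 0: siders.append(grid[i][j-1])
--                 if j < 3: siders.append(grid[i][j+1])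
--                 return siders
--     return []
-- ===== SOURCE B (Python) =====
-- def get_siders(box):
--     # Closed form: box names encode their coordinates (row letter A-D, column digit 1-4),
--     # so neighbors are computed arithmetically from the name instead of scanning the grid.
--     if isinstance(box, str) and len(box) == 2:
--         r, c = box[0], box[1]
--         if r in "ABCD" and c in "1234":
--             i = ord(r) - 65
--             j = ord(c) - 49
--             res = []
--             if i > 0: res.append(chr(64 + i) + c)
--             if i < 3: res.append(chr(66 + i) + c)
--             if j > 0: res.append(r + chr(48 + j))
--             if j < 3: res.append(r + chr(50 + j))
--             return res
--     return []
-- ===== Notes on version B (the rewrite author's own statement) =====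
-- stated objective: simpler
-- what changed: Replaces the double grid scan with a closed-form computation: the box name itself encodes its (row, column) coordinates, so the neighbor names are built arithmetically from the two characters with no grid traversal.
import Mathlib
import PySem

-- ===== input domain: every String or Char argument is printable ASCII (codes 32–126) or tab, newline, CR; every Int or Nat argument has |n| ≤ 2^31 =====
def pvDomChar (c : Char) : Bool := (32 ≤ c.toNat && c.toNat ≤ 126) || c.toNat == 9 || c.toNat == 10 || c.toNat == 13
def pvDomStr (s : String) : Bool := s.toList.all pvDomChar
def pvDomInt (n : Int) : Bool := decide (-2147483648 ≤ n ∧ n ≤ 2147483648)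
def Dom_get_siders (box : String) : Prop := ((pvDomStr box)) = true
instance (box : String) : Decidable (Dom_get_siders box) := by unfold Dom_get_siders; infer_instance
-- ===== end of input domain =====

-- B replaces A's double grid scan with a closed-form computation of the neighbor
-- names from the box name's two characters (objective: simpler).


-- ===== PORT A =====
def pvGrid : List (List String) :=
  [["A1","A2","A3","A4"],
   ["B1","B2","B3","B4"],
   ["C1","C2","C3","C4"],
   ["D1","D2","D3","D4"]]

-- grid[i][j]; the loops only use i,j ∈ 0..3 so the index is always in range
def pvCell (i j : Int) : String :=
  (PySem.List.pyGet? ((PySem.List.pyGet? pvGrid i).getD []) j).getD ""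

-- the siders list A builds by four conditional appends
def pvSiders (i j : Int) : List String :=
  (if i > 0 then [pvCell (i-1) j] else []) ++
  (if i < 3 then [pvCell (i+1) j] else []) ++
  (if j > 0 then [pvCell i (j-1)] else []) ++
  (if j < 3 then [pvCell i (j+1)] else [])

-- inner 'for j in range(0,4)' with its early return
def pvLoopJ (box : String) (i : Int) : List Int → Option (List String)
  | [] => none
  | j :: js => if pvCell i j = box then some (pvSiders i j) else pvLoopJ box i js

-- outer 'for i in range(0,4)' propagating the early return
def pvLoopI (box : String) : List Int → Option (List String)
  | [] => none
  | i :: is =>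
    match pvLoopJ box i (PySem.List.pyRange 0 4 1) with
    | some r => some r
    | none => pvLoopI box is

def get_siders (box : String) : List String :=
  (pvLoopI box (PySem.List.pyRange 0 4 1)).getD []

-- ===== PORT B =====
def get_siders_alt (box : String) : List String :=
  match box.toList with
  | [r, c] =>
    if ("ABCD".toList.contains r && "1234".toList.contains c) then
      let i : Int := (r.toNat : Int) - 65
      let j : Int := (c.toNat : Int) - 49
      (if i > 0 then [String.ofList [Char.ofNat (64 + i).toNat, c]] else []) ++
      (if i < 3 then [String.ofList [Char.ofNat (66 + i).toNat, c]] else []) ++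
      (if j > 0 then [String.ofList [r, Char.ofNat (48 + j).toNat]] else []) ++
      (if j < 3 then [String.ofList [r, Char.ofNat (50 + j).toNat]] else [])
    else []
  | _ => []

-- ===== PRECONDITION & SPEC =====
def Spec_get_siders (box : String) (out : List String) : Prop := out = get_siders_alt box
instance (box : String) (out : List String) : Decidable (Spec_get_siders box out) := by unfold Spec_get_siders; infer_instance

-- ===== CLAIM (what is proved, stated in full; the proofs are below) =====
def Claim_equal_get_siders : Prop := ∀ (box : String), Dom_get_siders box → Spec_get_siders box (get_siders box)

-- ===== LEMMAS AND PROOFS =====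
def pvNames : List String :=
  ["A1","A2","A3","A4","B1","B2","B3","B4","C1","C2","C3","C4","D1","D2","D3","D4"]

lemma pvA_not_found (box : String) (h : box ∉ pvNames) : get_siders box = [] := by
  have hne : ∀ n ∈ pvNames, ¬ (n = box) := fun n hn e => h (e ▸ hn)
  have hr : PySem.List.pyRange 0 4 1 = [0,1,2,3] := by decide
  simp only [get_siders, hr, pvLoopI, pvLoopJ,
    show pvCell 0 0 = "A1" from by decide, show pvCell 0 1 = "A2" from by decide,
    show pvCell 0 2 = "A3" from by decide, show pvCell 0 3 = "A4" from by decide,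
    show pvCell 1 0 = "B1" from by decide, show pvCell 1 1 = "B2" from by decide,
    show pvCell 1 2 = "B3" from by decide, show pvCell 1 3 = "B4" from by decide,
    show pvCell 2 0 = "C1" from by decide, show pvCell 2 1 = "C2" from by decide,
    show pvCell 2 2 = "C3" from by decide, show pvCell 2 3 = "C4" from by decide,
    show pvCell 3 0 = "D1" from by decide, show pvCell 3 1 = "D2" from by decide,
    show pvCell 3 2 = "D3" from by decide, show pvCell 3 3 = "D4" from by decide]
  simp [hne "A1" (by decide), hne "A2" (by decide), hne "A3" (by decide), hne "A4" (by decide),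
        hne "B1" (by decide), hne "B2" (by decide), hne "B3" (by decide), hne "B4" (by decide),
        hne "C1" (by decide), hne "C2" (by decide), hne "C3" (by decide), hne "C4" (by decide),
        hne "D1" (by decide), hne "D2" (by decide), hne "D3" (by decide), hne "D4" (by decide)]

lemma pvB_not_found (box : String) (h : box ∉ pvNames) : get_siders_alt box = [] := by
  have hbox : box = String.ofList box.toList := by simp
  unfold get_siders_alt
  rcases hl : box.toList with _ | ⟨r, _ | ⟨c, _ | _⟩⟩ <;> try rfl
  by_cases hc : ("ABCD".toList.contains r && "1234".toList.contains c) = true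
  swap
  · exact if_neg hc
  exfalso
  have hr : r ∈ "ABCD".toList :=
    List.contains_iff_mem.mp ((Bool.and_eq_true _ _).mp hc).1
  have hc' : c ∈ "1234".toList :=
    List.contains_iff_mem.mp ((Bool.and_eq_true _ _).mp hc).2
  apply h
  rw [hbox, hl]
  fin_cases hr <;> fin_cases hc' <;> decide

-- ===== VERDICT (by name: the statement is the Claim_ definition above) =====
theorem get_siders_spec : Claim_equal_get_siders := by
  intro box _
  unfold Spec_get_siders
  by_cases h : box ∈ pvNames
  · fin_cases h <;> decide
  · rw [pvA_not_found box h, pvB_not_found box h]
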